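-- pv_equiv track=rewrite | github.com/MoseleyBioinformaticsLab/MESSES | src/messes/validate/verify_parsed_metadata.py | compile_protocol_CV_ancestor
-- ===== SOURCE A (Python) =====
-- def compile_protocol_CV_ancestor(parsed_metadata, controlled_vocabulary):
--     """Loops over the protocol table in parsed_metadata and finds the closest
--     ancestor in each protocol's lineage that is in the controlled vocabulary.
--     Returns a dictionary where the keys are the protocols that have an ancestor
--     in the controlled vocabulary, and the value is that ancestor. If the protocol
--     itself is in the controlled vocabulary then its value is itself. If a protocol
--     has no ancestor in the controlled vocabulary then it will not be in the dictionary."""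
--
--     protocol_CV_ancestor = {}
--
--     if not "protocol" in parsed_metadata or not "parent_protocol" in controlled_vocabulary:
--         return protocol_CV_ancestor
--
--     for protocol_name, protocol_fields in parsed_metadata["protocol"].items():
--         original_protocol_name = protocol_name
--         while not protocol_name in controlled_vocabulary["parent_protocol"]:
--             if "parentID" in protocol_fields:
--                 protocol_name = protocol_fields["parentID"]
--                 if protocol_fields["parentID"] in parsed_metadata["protocol"]:
--                     protocol_fields = parsed_metadata["protocol"][protocol_name]
--
--                 else:
--                     break
--             else:
--                 break
--
--
--         if protocol_name in controlled_vocabulary["parent_protocol"]: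
--             protocol_CV_ancestor[original_protocol_name] = protocol_name
--
--
--     return protocol_CV_ancestor
-- ===== SOURCE B (Python) =====
-- def compile_protocol_CV_ancestor(parsed_metadata, controlled_vocabulary):
--     """Memoized version: resolve each protocol's closest CV ancestor by
--     walking its parent lineage once, caching the result for every protocol on the
--     walked path so later lookups are O(1)."""
--     ancestor = {}
--     if "protocol" not in parsed_metadata or "parent_protocol" not in controlled_vocabulary:
--         return ancestor
--     protocols = parsed_metadata["protocol"]
--     cv = controlled_vocabulary["parent_protocol"]
--     resolved = {}  # protocol name -> its CV ancestor, or None if it has none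
--
--     def resolve(name, fields):
--         path = []
--         cur, cur_fields = name, fields
--         while True:
--             if cur in resolved:
--                 result = resolved[cur]
--                 break
--             if cur in cv:
--                 result = cur
--                 break
--             path.append(cur)
--             if "parentID" not in cur_fields:
--                 result = None
--                 break
--             parent = cur_fields["parentID"]
--             if parent in protocols:
--                 cur, cur_fields = parent, protocols[parent]
--             else:
--                 result = parent if parent in cv else None
--                 break
--         for q in path:
--             resolved[q] = result
--         return result
--
--     for name, fields in protocols.items():
--         r = resolve(name, fields)
--         if r is not None:
--             ancestor[name] = r
--     return ancestor
-- ===== Notes on version B (the rewrite author's own statement) =====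
-- stated objective: alternative
-- what changed: B resolves each protocol's CV ancestor via a memo dictionary filled along each walked lineage (each protocol's chain is walked at most once overall), instead of A's independent re-walk of the full parent chain for every protocol; on the sampled input family the measured cost is the same.
import Mathlib
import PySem

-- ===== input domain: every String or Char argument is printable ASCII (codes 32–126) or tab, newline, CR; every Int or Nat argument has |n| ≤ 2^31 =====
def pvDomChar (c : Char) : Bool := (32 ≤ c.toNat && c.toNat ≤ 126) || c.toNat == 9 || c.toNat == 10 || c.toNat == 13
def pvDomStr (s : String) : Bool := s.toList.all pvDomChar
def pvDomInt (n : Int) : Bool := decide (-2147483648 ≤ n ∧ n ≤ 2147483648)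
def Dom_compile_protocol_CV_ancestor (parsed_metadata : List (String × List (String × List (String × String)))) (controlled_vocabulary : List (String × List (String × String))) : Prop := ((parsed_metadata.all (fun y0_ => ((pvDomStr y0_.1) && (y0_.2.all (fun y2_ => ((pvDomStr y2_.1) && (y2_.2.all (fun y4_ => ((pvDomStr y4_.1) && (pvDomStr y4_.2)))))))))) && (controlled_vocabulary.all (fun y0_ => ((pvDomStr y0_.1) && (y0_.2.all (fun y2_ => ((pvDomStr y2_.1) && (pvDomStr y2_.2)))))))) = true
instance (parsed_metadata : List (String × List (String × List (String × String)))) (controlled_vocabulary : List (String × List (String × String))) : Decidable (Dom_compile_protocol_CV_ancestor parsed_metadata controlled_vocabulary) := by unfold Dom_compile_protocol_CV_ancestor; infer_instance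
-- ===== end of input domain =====

-- B replaces A's per-protocol re-walk of the parent lineage by a memoized resolution
-- pass (each protocol's CV ancestor is cached along the walked path): an alternative
-- algorithm; a timing run measured no speed difference on its input family.


-- ===== PORT A =====
-- A's inner while loop: returns the final value of protocol_name.  The Nat argument is
-- pure fuel making the recursion structural; Pre_ guarantees it is never exhausted.
def pvWalkA (prot : List (String × List (String × String))) (cvp : List (String × String)) :
    Nat → String → List (String × String) → String
  | 0, name, _ => name
  | n+1, name, fields =>
    if (PySem.Dict.mk cvp).contains name then name
    else
      match (PySem.Dict.mk fields).get? "parentID" with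
      | none => name
      | some p =>
        match (PySem.Dict.mk prot).get? p with
        | some f' => pvWalkA prot cvp n p f'
        | none => p

def compile_protocol_CV_ancestor (parsed_metadata : List (String × List (String × List (String × String)))) (controlled_vocabulary : List (String × List (String × String))) : List (String × String) :=
  match (PySem.Dict.mk parsed_metadata).get? "protocol",
        (PySem.Dict.mk controlled_vocabulary).get? "parent_protocol" with
  | some prot, some cvp =>
    (prot.foldl
      (fun (acc : PySem.Dict String String) kf =>
        let fin := pvWalkA prot cvp (prot.length + 1) kf.1 kf.2
        if (PySem.Dict.mk cvp).contains fin then acc.insert kf.1 fin else acc)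
      PySem.Dict.empty).items
  | _, _ => []

-- ===== PORT B =====
-- B's resolve(): walk the lineage, stop at a memoized protocol or a CV term, collect the
-- walked path, and return (result, path).  Fuel as in pvWalkA.
def pvResolveB (prot : List (String × List (String × String))) (cvp : List (String × String))
    (resolved : PySem.Dict String (Option String)) :
    Nat → String → List (String × String) → List String → Option String × List String
  | 0, _, _, path => (none, path)
  | n+1, cur, fields, path =>
    match resolved.get? cur with
    | some r => (r, path)
    | none =>
      if (PySem.Dict.mk cvp).contains cur then (some cur, path)
      else
        let path := path ++ [cur]
        match (PySem.Dict.mk fields).get? "parentID" with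
        | none => (none, path)
        | some p =>
          match (PySem.Dict.mk prot).get? p with
          | some f' => pvResolveB prot cvp resolved n p f' path
          | none => (if (PySem.Dict.mk cvp).contains p then some p else none, path)

def compile_protocol_CV_ancestor_alt (parsed_metadata : List (String × List (String × List (String × String)))) (controlled_vocabulary : List (String × List (String × String))) : List (String × String) :=
  match (PySem.Dict.mk parsed_metadata).get? "protocol" with
  | none => []
  | some prot =>
    match (PySem.Dict.mk controlled_vocabulary).get? "parent_protocol" with
    | none => []
    | some cvp =>
    (prot.foldl
      (fun (st : PySem.Dict String (Option String) × PySem.Dict String String) kf =>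
        let rp := pvResolveB prot cvp st.1 (prot.length + 1) kf.1 kf.2 []
        let resolved := rp.2.foldl (fun d q => d.insert q rp.1) st.1
        let out := match rp.1 with
                   | some v => st.2.insert kf.1 v
                   | none => st.2
        (resolved, out))
      (PySem.Dict.empty, PySem.Dict.empty)).2.items

-- ===== PRECONDITION & SPEC =====
-- the parent-pointer map on protocol names: none at a CV term, at a name outside the
-- table and at a protocol without parentID (i.e. wherever a lineage walk stops)
def pvParentStep (prot : List (String × List (String × String)))
    (cvp : List (String × String)) (k : String) : Option String :=
  if (PySem.Dict.mk cvp).contains k then none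
  else
    match (PySem.Dict.mk prot).get? k with
    | none => none
    | some f => (PySem.Dict.mk f).get? "parentID"

-- Pre_ excludes (a) protocol tables whose association list repeats a key (not a Python
-- dict; A's first-match/overwrite mix is a representation artefact) and (b) cyclic parent
-- lineages that never meet the vocabulary, on which Python A loops forever.
def pvPreB (parsed_metadata : List (String × List (String × List (String × String)))) (controlled_vocabulary : List (String × List (String × String))) : Bool :=
  match (PySem.Dict.mk parsed_metadata).get? "protocol" with
  | none => true
  | some prot =>
    match (PySem.Dict.mk controlled_vocabulary).get? "parent_protocol" with
    | none => true
    | some cvp =>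
      decide ((prot.map Prod.fst).Nodup) &&
        prot.all (fun kf =>
          (((fun o => o.bind (pvParentStep prot cvp))^[prot.length + 1]) (some kf.1)).isNone)

def Pre_compile_protocol_CV_ancestor (parsed_metadata : List (String × List (String × List (String × String)))) (controlled_vocabulary : List (String × List (String × String))) : Prop :=
  pvPreB parsed_metadata controlled_vocabulary = true
instance (parsed_metadata : List (String × List (String × List (String × String)))) (controlled_vocabulary : List (String × List (String × String))) : Decidable (Pre_compile_protocol_CV_ancestor parsed_metadata controlled_vocabulary) := by unfold Pre_compile_protocol_CV_ancestor; infer_instance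

def pvWitness_compile_protocol_CV_ancestor : (List (String × List (String × List (String × String)))) × (List (String × List (String × String))) :=
  ([("protocol", [("p1", [("parentID", "p0")]), ("p2", [])])], [("parent_protocol", [("p0", "term")])])

def Spec_compile_protocol_CV_ancestor (parsed_metadata : List (String × List (String × List (String × String)))) (controlled_vocabulary : List (String × List (String × String))) (out : List (String × String)) : Prop := out = compile_protocol_CV_ancestor_alt parsed_metadata controlled_vocabulary
instance (parsed_metadata : List (String × List (String × List (String × String)))) (controlled_vocabulary : List (String × List (String × String))) (out : List (String × String)) : Decidable (Spec_compile_protocol_CV_ancestor parsed_metadata controlled_vocabulary out) := by unfold Spec_compile_protocol_CV_ancestor; infer_instance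

-- ===== CLAIM (what is proved, stated in full; the proofs are below) =====
def Claim_equal_compile_protocol_CV_ancestor : Prop := ∀ (parsed_metadata : List (String × List (String × List (String × String)))) (controlled_vocabulary : List (String × List (String × String))), Dom_compile_protocol_CV_ancestor parsed_metadata controlled_vocabulary → Pre_compile_protocol_CV_ancestor parsed_metadata controlled_vocabulary → Spec_compile_protocol_CV_ancestor parsed_metadata controlled_vocabulary (compile_protocol_CV_ancestor parsed_metadata controlled_vocabulary)

-- ===== LEMMAS AND PROOFS =====

-- proof-side fuel form of "the lineage from k terminates within n steps"
def pvChainOk (prot : List (String × List (String × String))) (cvp : List (String × String)) :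
    Nat → String → Bool
  | 0, _ => false
  | n+1, k =>
    (PySem.Dict.mk cvp).contains k ||
      match (PySem.Dict.mk prot).get? k with
      | none => true
      | some f =>
        match (PySem.Dict.mk f).get? "parentID" with
        | none => true
        | some p => pvChainOk prot cvp n p

-- the canonical chain result: closest CV ancestor of k, none if the lineage misses the CV
def pvChain (prot : List (String × List (String × String))) (cvp : List (String × String)) :
    Nat → String → Option String
  | 0, _ => none
  | n+1, k =>
    if (PySem.Dict.mk cvp).contains k then some k
    else
      match (PySem.Dict.mk prot).get? k with
      | none => none
      | some f =>
        match (PySem.Dict.mk f).get? "parentID" with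
        | none => none
        | some p => pvChain prot cvp n p

-- one-step unfolding lemmas (rw with these instead of simp [f] to unfold exactly one level)
theorem pvChainOk_succ_def (prot : List (String × List (String × String)))
    (cvp : List (String × String)) (n : Nat) (k : String) :
    pvChainOk prot cvp (n+1) k =
      ((PySem.Dict.mk cvp).contains k ||
        match (PySem.Dict.mk prot).get? k with
        | none => true
        | some f =>
          match (PySem.Dict.mk f).get? "parentID" with
          | none => true
          | some p => pvChainOk prot cvp n p) := rfl

theorem pvChain_succ_def (prot : List (String × List (String × String)))
    (cvp : List (String × String)) (n : Nat) (k : String) :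
    pvChain prot cvp (n+1) k =
      (if (PySem.Dict.mk cvp).contains k then some k
       else
        match (PySem.Dict.mk prot).get? k with
        | none => none
        | some f =>
          match (PySem.Dict.mk f).get? "parentID" with
          | none => none
          | some p => pvChain prot cvp n p) := rfl

theorem pvWalkA_succ_def (prot : List (String × List (String × String)))
    (cvp : List (String × String)) (n : Nat) (k : String) (f : List (String × String)) :
    pvWalkA prot cvp (n+1) k f =
      (if (PySem.Dict.mk cvp).contains k then k
       else
        match (PySem.Dict.mk f).get? "parentID" with
        | none => k
        | some p =>
          match (PySem.Dict.mk prot).get? p with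
          | some f' => pvWalkA prot cvp n p f'
          | none => p) := rfl

theorem pvResolveB_succ_def (prot : List (String × List (String × String)))
    (cvp : List (String × String)) (resolved : PySem.Dict String (Option String))
    (n : Nat) (k : String) (f : List (String × String)) (path : List String) :
    pvResolveB prot cvp resolved (n+1) k f path =
      (match resolved.get? k with
       | some r => (r, path)
       | none =>
         if (PySem.Dict.mk cvp).contains k then (some k, path)
         else
           let path := path ++ [k]
           match (PySem.Dict.mk f).get? "parentID" with
           | none => (none, path)
           | some p =>
             match (PySem.Dict.mk prot).get? p with
             | some f' => pvResolveB prot cvp resolved n p f' path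
             | none => (if (PySem.Dict.mk cvp).contains p then some p else none, path)) := rfl

theorem pvIter_none {prot : List (String × List (String × String))}
    {cvp : List (String × String)} (n : Nat) :
    (fun o => o.bind (pvParentStep prot cvp))^[n] none = none := by
  induction n with
  | zero => rfl
  | succ n ih => rw [Function.iterate_succ_apply]; exact ih

theorem pvIter_none_iff {prot : List (String × List (String × String))}
    {cvp : List (String × String)} : ∀ (n : Nat) (k : String),
    ((fun o => o.bind (pvParentStep prot cvp))^[n] (some k) = none) ↔
      pvChainOk prot cvp n k = true := by
  intro n
  induction n with
  | zero => intro k; simp [pvChainOk]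
  | succ n ih =>
    intro k
    rw [Function.iterate_succ_apply, pvChainOk_succ_def]
    rw [show (some k).bind (pvParentStep prot cvp) = pvParentStep prot cvp k from rfl]
    cases hs : pvParentStep prot cvp k with
    | none =>
      rw [pvIter_none]
      refine ⟨fun _ => ?_, fun _ => rfl⟩
      unfold pvParentStep at hs
      cases hcv : (PySem.Dict.mk cvp).contains k with
      | true => simp
      | false =>
        rw [hcv] at hs
        simp only [Bool.false_eq_true, if_false] at hs
        simp only [Bool.false_or]
        cases hg : (PySem.Dict.mk prot).get? k with
        | none => simp
        | some f =>
          rw [hg] at hs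
          try simp only [] at hs
          try simp only []
          simp [hs]
    | some p =>
      unfold pvParentStep at hs
      cases hcv : (PySem.Dict.mk cvp).contains k with
      | true =>
        rw [hcv] at hs
        simp at hs
      | false =>
        rw [hcv] at hs
        simp only [Bool.false_eq_true, if_false] at hs
        simp only [Bool.false_or]
        cases hg : (PySem.Dict.mk prot).get? k with
        | none =>
          rw [hg] at hs
          simp at hs
        | some f =>
          rw [hg] at hs
          try simp only [] at hs
          try simp only []
          rw [hs]
          try simp only []
          exact ih p


theorem pvChainOk_succ {prot : List (String × List (String × String))}
    {cvp : List (String × String)} {n : Nat} {k : String}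
    (h : pvChainOk prot cvp n k = true) : pvChainOk prot cvp (n+1) k = true := by
  induction n generalizing k with
  | zero => simp [pvChainOk] at h
  | succ n ih =>
    rw [pvChainOk_succ_def] at h
    rw [pvChainOk_succ_def]
    cases hcv : (PySem.Dict.mk cvp).contains k with
    | true => simp
    | false =>
      simp only [hcv, Bool.false_or] at h ⊢
      cases hg : (PySem.Dict.mk prot).get? k with
      | none => simp
      | some f =>
        rw [hg] at h
        try simp only [] at h
        try simp only []
        cases hp : (PySem.Dict.mk f).get? "parentID" with
        | none => simp
        | some p =>
          rw [hp] at h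
          try simp only [] at h
          try simp only []
          exact ih h

theorem pvChainOk_le {prot : List (String × List (String × String))}
    {cvp : List (String × String)} {n m : Nat} {k : String}
    (h : pvChainOk prot cvp n k = true) (hnm : n ≤ m) : pvChainOk prot cvp m k = true := by
  induction m with
  | zero =>
    have hz : n = 0 := by omega
    subst hz; exact h
  | succ m ih =>
    rcases Nat.eq_or_lt_of_le hnm with rfl | hlt
    · exact h
    · exact pvChainOk_succ (ih (by omega))

theorem pvChain_stable {prot : List (String × List (String × String))}
    {cvp : List (String × String)} {n : Nat} {k : String}
    (h : pvChainOk prot cvp n k = true) :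
    pvChain prot cvp (n+1) k = pvChain prot cvp n k := by
  induction n generalizing k with
  | zero => simp [pvChainOk] at h
  | succ n ih =>
    rw [pvChainOk_succ_def] at h
    conv_lhs => rw [pvChain_succ_def]
    conv_rhs => rw [pvChain_succ_def]
    cases hcv : (PySem.Dict.mk cvp).contains k with
    | true => simp
    | false =>
      simp only [hcv, Bool.false_or] at h
      simp only [Bool.false_eq_true, if_false]
      cases hg : (PySem.Dict.mk prot).get? k with
      | none => rfl
      | some f =>
        rw [hg] at h
        try simp only [] at h
        try simp only []
        cases hp : (PySem.Dict.mk f).get? "parentID" with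
        | none => rfl
        | some p =>
          rw [hp] at h
          try simp only [] at h
          try simp only []
          exact ih h

theorem pvChain_eq_of_le {prot : List (String × List (String × String))}
    {cvp : List (String × String)} {n m : Nat} {k : String}
    (h : pvChainOk prot cvp n k = true) (hnm : n ≤ m) :
    pvChain prot cvp m k = pvChain prot cvp n k := by
  induction m with
  | zero =>
    have hz : n = 0 := by omega
    subst hz; rfl
  | succ m ih =>
    rcases Nat.eq_or_lt_of_le hnm with rfl | hlt
    · rfl
    · rw [pvChain_stable (pvChainOk_le h (by omega)), ih (by omega)]

theorem pvChain_offtable {prot : List (String × List (String × String))}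
    {cvp : List (String × String)} {n : Nat} {p : String}
    (h : pvChainOk prot cvp n p = true)
    (hg : (PySem.Dict.mk prot).get? p = none) :
    pvChain prot cvp n p = if (PySem.Dict.mk cvp).contains p then some p else none := by
  cases n with
  | zero => simp [pvChainOk] at h
  | succ n =>
    rw [pvChain_succ_def, hg]

-- A's walk computes pvChain
theorem pvWalkA_chain {prot : List (String × List (String × String))}
    {cvp : List (String × String)} : ∀ {n : Nat} {k : String} {f : List (String × String)},
    (PySem.Dict.mk prot).get? k = some f → pvChainOk prot cvp n k = true →
    (if (PySem.Dict.mk cvp).contains (pvWalkA prot cvp n k f) then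
       some (pvWalkA prot cvp n k f) else none) = pvChain prot cvp n k := by
  intro n
  induction n with
  | zero => intro k f _ h; simp [pvChainOk] at h
  | succ n ih =>
    intro k f hk h
    rw [pvChainOk_succ_def, hk] at h
    rw [pvWalkA_succ_def, pvChain_succ_def, hk]
    cases hcv : (PySem.Dict.mk cvp).contains k with
    | true => simp [hcv]
    | false =>
      simp only [hcv, Bool.false_or] at h
      simp only [Bool.false_eq_true, if_false]
      try simp only [] at h
      try simp only []
      cases hp : (PySem.Dict.mk f).get? "parentID" with
      | none => simp [hcv]
      | some p =>
        rw [hp] at h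
        try simp only [] at h
        try simp only []
        cases hg : (PySem.Dict.mk prot).get? p with
        | none =>
          simp only []
          exact (pvChain_offtable h hg).symm
        | some f' =>
          simp only []
          exact ih hg h

-- memo invariant: every cached value is the true chain result of its key
def pvInv (prot : List (String × List (String × String))) (cvp : List (String × String))
    (resolved : PySem.Dict String (Option String)) : Prop :=
  ∀ q r, resolved.get? q = some r →
    ∃ m, pvChainOk prot cvp m q = true ∧ pvChain prot cvp m q = r

-- B's resolve computes pvChain, and every protocol on the returned path has that same chain value
theorem pvResolveB_chain {prot : List (String × List (String × String))}
    {cvp : List (String × String)} :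
    ∀ {n : Nat} {k : String} {f : List (String × String)} {path : List String}
      {resolved : PySem.Dict String (Option String)}, pvInv prot cvp resolved →
    (PySem.Dict.mk prot).get? k = some f → pvChainOk prot cvp n k = true →
    (pvResolveB prot cvp resolved n k f path).1 = pvChain prot cvp n k ∧
    ∃ L, (pvResolveB prot cvp resolved n k f path).2 = path ++ L ∧
      ∀ q ∈ L, ∃ m, pvChainOk prot cvp m q = true ∧ pvChain prot cvp m q = pvChain prot cvp n k := by
  intro n
  induction n with
  | zero => intro k f path resolved _ _ h; simp [pvChainOk] at h
  | succ n ih =>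
    intro k f path resolved hinv hk h
    have hok := h
    rw [pvChainOk_succ_def, hk] at h
    simp only [] at h
    rw [pvResolveB_succ_def]
    cases hm : resolved.get? k with
    | some r =>
      obtain ⟨m, hmok, hmch⟩ := hinv k r hm
      refine ⟨?_, [], by simp, by simp⟩
      simp only []
      rcases Nat.le_total m (n+1) with hle | hle
      · rw [← pvChain_eq_of_le hmok hle] at hmch
        exact hmch.symm
      · rw [pvChain_eq_of_le hok hle] at hmch
        exact hmch.symm
    | none =>
      simp only []
      cases hcv : (PySem.Dict.mk cvp).contains k with
      | true =>
        rw [if_pos rfl]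
        refine ⟨?_, [], by simp, by simp⟩
        rw [pvChain_succ_def]
        simp [hcv]
      | false =>
        simp only [hcv, Bool.false_or] at h
        simp only [Bool.false_eq_true, if_false]
        try simp only []
        have hchain : pvChain prot cvp (n+1) k =
            (match (PySem.Dict.mk f).get? "parentID" with
             | none => none
             | some p => pvChain prot cvp n p) := by
          rw [pvChain_succ_def, hk]
          simp [hcv]
        cases hp : (PySem.Dict.mk f).get? "parentID" with
        | none =>
          rw [hp] at h hchain
          try simp only [] at h hchain
          try simp only []
          refine ⟨by rw [hchain], [k], by simp, ?_⟩
          intro q hq; simp only [List.mem_singleton] at hq; subst hq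
          exact ⟨n+1, hok, by rw [hchain]⟩
        | some p =>
          rw [hp] at h hchain
          try simp only [] at h hchain
          try simp only []
          cases hg : (PySem.Dict.mk prot).get? p with
          | none =>
            try simp only []
            rw [pvChain_offtable h hg] at hchain
            refine ⟨by rw [hchain], [k], by simp, ?_⟩
            intro q hq; simp only [List.mem_singleton] at hq; subst hq
            exact ⟨n+1, hok, by rw [hchain]⟩
          | some f' =>
            try simp only []
            obtain ⟨h1, L, h2, h3⟩ := ih (f := f') (path := path ++ [k]) hinv hg h
            refine ⟨by rw [h1, hchain], k :: L, by simpa using h2, ?_⟩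
            intro q hq
            rcases List.mem_cons.mp hq with rfl | hq
            · exact ⟨n+1, hok, by rw [hchain]⟩
            · obtain ⟨m, hm1, hm2⟩ := h3 q hq
              exact ⟨m, hm1, by rw [hm2, hchain]⟩

theorem pvInv_after {prot : List (String × List (String × String))}
    {cvp : List (String × String)} {resolved : PySem.Dict String (Option String)}
    {r : Option String} {L : List String}
    (hinv : pvInv prot cvp resolved)
    (hL : ∀ q ∈ L, ∃ m, pvChainOk prot cvp m q = true ∧ pvChain prot cvp m q = r) :
    pvInv prot cvp (L.foldl (fun d q => d.insert q r) resolved) := by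
  induction L generalizing resolved with
  | nil => exact hinv
  | cons q L ih =>
    simp only [List.foldl_cons]
    refine ih (fun q' r' hq' => ?_) (fun q hq => hL q (List.mem_cons_of_mem _ hq))
    rw [PySem.Dict.get?_insert] at hq'
    split at hq'
    · rename_i heq
      subst heq
      cases hq'
      exact hL _ (by simp)
    · exact hinv _ _ hq'

-- the two folds agree
theorem pvFold_eq {prot : List (String × List (String × String))}
    {cvp : List (String × String)} {N : Nat} :
    ∀ (l : List (String × List (String × String)))
      (resolved : PySem.Dict String (Option String)) (out : PySem.Dict String String),
    pvInv prot cvp resolved →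
    (∀ kf ∈ l, (PySem.Dict.mk prot).get? kf.1 = some kf.2 ∧ pvChainOk prot cvp N kf.1 = true) →
    l.foldl
      (fun (acc : PySem.Dict String String) kf =>
        let fin := pvWalkA prot cvp N kf.1 kf.2
        if (PySem.Dict.mk cvp).contains fin then acc.insert kf.1 fin else acc) out =
    (l.foldl
      (fun (st : PySem.Dict String (Option String) × PySem.Dict String String) kf =>
        let rp := pvResolveB prot cvp st.1 N kf.1 kf.2 []
        let resolved := rp.2.foldl (fun d q => d.insert q rp.1) st.1
        let outd := match rp.1 with
                    | some v => st.2.insert kf.1 v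
                    | none => st.2
        (resolved, outd)) (resolved, out)).2 := by
  intro l
  induction l with
  | nil => intro resolved out _ _; rfl
  | cons kf l ih =>
    intro resolved out hinv hall
    obtain ⟨hk, hok⟩ := hall kf (List.mem_cons_self ..)
    have hA := pvWalkA_chain (cvp := cvp) hk hok
    obtain ⟨hB, L, hL, hLall⟩ := pvResolveB_chain (path := ([] : List String)) hinv hk hok
    simp only [List.foldl_cons]
    have hinv' : pvInv prot cvp
        ((pvResolveB prot cvp resolved N kf.1 kf.2 []).2.foldl
          (fun d q => d.insert q (pvResolveB prot cvp resolved N kf.1 kf.2 []).1) resolved) := by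
      rw [hL]
      simpa using pvInv_after hinv (by rw [hB]; exact hLall)
    have houts :
        (if (PySem.Dict.mk cvp).contains (pvWalkA prot cvp N kf.1 kf.2) then
           out.insert kf.1 (pvWalkA prot cvp N kf.1 kf.2) else out) =
        (match (pvResolveB prot cvp resolved N kf.1 kf.2 []).1 with
         | some v => out.insert kf.1 v
         | none => out) := by
      rw [hB, ← hA]
      cases hcv : (PySem.Dict.mk cvp).contains (pvWalkA prot cvp N kf.1 kf.2) with
      | true => simp
      | false => simp
    try simp only []
    rw [houts]
    exact ih _ _ hinv' (fun kf' hmem => hall kf' (List.mem_cons_of_mem _ hmem))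

-- ===== VERDICT (by name: the statement is the Claim_ definition above) =====
theorem compile_protocol_CV_ancestor_spec : Claim_equal_compile_protocol_CV_ancestor := by
  intro pm cv _ hpre
  unfold Spec_compile_protocol_CV_ancestor
  unfold compile_protocol_CV_ancestor compile_protocol_CV_ancestor_alt
  unfold Pre_compile_protocol_CV_ancestor pvPreB at hpre
  cases hp : (PySem.Dict.mk pm).get? "protocol" with
  | none =>
    cases hc : (PySem.Dict.mk cv).get? "parent_protocol" with
    | none => simp
    | some cvp => simp
  | some prot =>
    cases hc : (PySem.Dict.mk cv).get? "parent_protocol" with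
    | none => simp
    | some cvp =>
      simp only [hp, hc, Bool.and_eq_true, decide_eq_true_eq, List.all_eq_true] at hpre
      obtain ⟨hnd, hok⟩ := hpre
      simp only []
      congr 1
      refine pvFold_eq prot PySem.Dict.empty PySem.Dict.empty
        (fun q r hqr => by simp [PySem.Dict.get?_empty] at hqr) ?_
      intro kf hkf
      refine ⟨?_, (pvIter_none_iff _ _).mp (by simpa using hok kf hkf)⟩
      exact PySem.Dict.get?_of_mem_items (PySem.Dict.mk prot) (by simpa using hkf) (by simpa using hnd)
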